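-- pv_equiv track=rewrite | github.com/danieleschmidt/causal-interface-gym | src/causal_interface_gym/research/benchmarking.py | _answers_similar
-- ===== SOURCE A (Python) =====
-- from typing import Dict, List, Any, Optional, Tuple, Union
--
-- def _answers_similar(answer1: Any, answer2: Any) -> bool:
--     """Check if two answers are semantically similar."""
--     if isinstance(answer1, str) and isinstance(answer2, str):
--         # Simple string similarity
--         answer1, answer2 = answer1.lower().strip(), answer2.lower().strip()
--
--         # Check for synonyms
--         synonyms = {
--             'intervention': ['manipulate', 'do', 'force', 'control'],
--             'observation': ['observe', 'see', 'correlate', 'associate'],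
--             'yes': ['true', 'correct', 'right'],
--             'no': ['false', 'incorrect', 'wrong']
--         }
--
--         for key, values in synonyms.items():
--             if (answer1 == key and answer2 in values) or (answer2 == key and answer1 in values):
--                 return True
--
--         return answer1 == answer2
--
--     return answer1 == answer2
-- ===== SOURCE B (Python) =====
-- _SIMILAR_PAIRS = {
--     ('intervention', 'manipulate'), ('do', 'intervention'),
--     ('force', 'intervention'), ('control', 'intervention'),
--     ('observation', 'observe'), ('observation', 'see'),
--     ('correlate', 'observation'), ('associate', 'observation'),
--     ('true', 'yes'), ('correct', 'yes'), ('right', 'yes'),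
--     ('false', 'no'), ('incorrect', 'no'), ('no', 'wrong'),
-- }
--
--
-- def _answers_similar(answer1, answer2):
--     """Check if two answers are semantically similar."""
--     if isinstance(answer1, str) and isinstance(answer2, str):
--         a1, a2 = answer1.lower().strip(), answer2.lower().strip()
--         if a1 == a2:
--             return True
--         pair = (a1, a2) if a1 < a2 else (a2, a1)
--         return pair in _SIMILAR_PAIRS
--     return answer1 == answer2
-- ===== Notes on version B (the rewrite author's own statement) =====
-- stated objective: alternative
-- what changed: Replaces A's loop over the key->values synonym dict (with its asymmetric key/value membership tests) by a precomputed flat set of lexicographically sorted equivalent pairs: normalize, sort the two strings into one ordered pair, and do a single set-membership test.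
import Mathlib
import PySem

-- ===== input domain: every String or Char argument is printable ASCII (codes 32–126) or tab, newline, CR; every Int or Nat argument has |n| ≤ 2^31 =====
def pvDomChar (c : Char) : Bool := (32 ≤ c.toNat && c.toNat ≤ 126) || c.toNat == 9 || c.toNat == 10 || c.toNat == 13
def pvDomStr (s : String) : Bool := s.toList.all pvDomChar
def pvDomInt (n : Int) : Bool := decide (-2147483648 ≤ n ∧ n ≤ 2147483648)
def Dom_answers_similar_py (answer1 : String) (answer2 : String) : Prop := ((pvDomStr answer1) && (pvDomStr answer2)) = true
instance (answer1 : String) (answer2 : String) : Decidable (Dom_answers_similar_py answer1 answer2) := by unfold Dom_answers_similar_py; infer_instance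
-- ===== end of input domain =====

-- B replaces A's key→values loop by a flat precomputed SET of lexicographically sorted
-- equivalent pairs: normalize, sort the two strings into a pair, one membership test (alternative).


-- ===== PORT A =====
-- Both parameters are String here, so the isinstance guard is always true and only the
-- string branch is ported; the `synonyms` dict literal in insertion order:
def pvSynonyms : List (String × List String) :=
  [("intervention", ["manipulate", "do", "force", "control"]),
   ("observation", ["observe", "see", "correlate", "associate"]),
   ("yes", ["true", "correct", "right"]),
   ("no", ["false", "incorrect", "wrong"])]

-- `for key, values in synonyms.items(): if … : return True` then `return answer1 == answer2`
def pvSynLoop : List (String × List String) → String → String → Bool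
  | [], a1, a2 => a1 == a2
  | (key, values) :: rest, a1, a2 =>
    if (a1 == key && values.contains a2) || (a2 == key && values.contains a1) then true
    else pvSynLoop rest a1 a2

def answers_similar_py (answer1 : String) (answer2 : String) : Bool :=
  let a1 := PySem.Str.strip (PySem.Str.lower answer1)
  let a2 := PySem.Str.strip (PySem.Str.lower answer2)
  pvSynLoop pvSynonyms a1 a2

-- ===== PORT B =====
-- the module-level _SIMILAR_PAIRS set literal of Source B (a Python set of 14 distinct pairs)
def pvSimilarPairs : PySem.Set (String × String) :=
  PySem.Set.ofList
    [("intervention", "manipulate"), ("do", "intervention"),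
     ("force", "intervention"), ("control", "intervention"),
     ("observation", "observe"), ("observation", "see"),
     ("correlate", "observation"), ("associate", "observation"),
     ("true", "yes"), ("correct", "yes"), ("right", "yes"),
     ("false", "no"), ("incorrect", "no"), ("no", "wrong")]

-- Python's  a1 < a2  on str is lexicographic code-point order = List.lt on the char lists (exact here)
def pvStrLtB (x y : String) : Bool := decide (x.toList < y.toList)

def answers_similar_py_alt (answer1 : String) (answer2 : String) : Bool :=
  let a1 := PySem.Str.strip (PySem.Str.lower answer1)
  let a2 := PySem.Str.strip (PySem.Str.lower answer2)
  if a1 == a2 then true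
  else
    let pair := if pvStrLtB a1 a2 then (a1, a2) else (a2, a1)
    PySem.Set.contains pvSimilarPairs pair

-- ===== PRECONDITION & SPEC =====
def Spec_answers_similar_py (answer1 : String) (answer2 : String) (out : Bool) : Prop := out = answers_similar_py_alt answer1 answer2
instance (answer1 : String) (answer2 : String) (out : Bool) : Decidable (Spec_answers_similar_py answer1 answer2 out) := by unfold Spec_answers_similar_py; infer_instance

-- ===== CLAIM (what is proved, stated in full; the proofs are below) =====
def Claim_equal_answers_similar_py : Prop := ∀ (answer1 : String) (answer2 : String), Dom_answers_similar_py answer1 answer2 → Spec_answers_similar_py answer1 answer2 (answers_similar_py answer1 answer2)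

-- ===== LEMMAS AND PROOFS =====

-- the (key, value) pairs induced by a synonyms association list, in order
def pvPairsOf (syns : List (String × List String)) : List (String × String) :=
  syns.flatMap (fun kv => kv.2.map (fun v => (kv.1, v)))

-- sort a pair of strings lexicographically (what Source B's `(a1,a2) if a1<a2 else (a2,a1)` computes)
def pvSp (x y : String) : String × String :=
  if pvStrLtB x y then (x, y) else (y, x)

theorem pvStrLt_antisymm_eq {x y : String} (h1 : pvStrLtB x y = false) (h2 : pvStrLtB y x = false) :
    x = y := by
  unfold pvStrLtB at h1 h2
  have hx : ¬ x.toList < y.toList := by simpa using h1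
  have hy : ¬ y.toList < x.toList := by simpa using h2
  have : x.toList = y.toList := le_antisymm (not_lt.mp hy) (not_lt.mp hx)
  exact String.ext this

theorem pvStrLt_asymm {x y : String} (h : pvStrLtB x y = true) : pvStrLtB y x = false := by
  unfold pvStrLtB at h ⊢
  simp only [decide_eq_true_eq] at h
  simpa using asymm h

theorem pvSp_eq_iff (x y a b : String) :
    pvSp x y = pvSp a b ↔ (x = a ∧ y = b) ∨ (x = b ∧ y = a) := by
  constructor
  · intro h
    unfold pvSp at h
    cases hxy : pvStrLtB x y <;> cases hab : pvStrLtB a b <;>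
      rw [hxy, hab] at h <;> simp_all [Prod.ext_iff]
  · rintro (⟨hx, hy⟩ | ⟨hx, hy⟩)
    · rw [hx, hy]
    · subst hx; subst hy
      unfold pvSp
      cases hxy : pvStrLtB x y
      · cases hyx : pvStrLtB y x
        · have := pvStrLt_antisymm_eq hxy hyx
          simp [this]
        · simp
      · rw [pvStrLt_asymm hxy]
        simp

-- the set of sorted pairs, queried at a sorted pair, answers exactly "pair or its swap is listed"
theorem pvContains_map_sp (P : List (String × String)) (a b : String) :
    (P.map (fun p => pvSp p.1 p.2)).contains (pvSp a b)
      = (P.contains (a, b) || P.contains (b, a)) := by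
  induction P with
  | nil => simp
  | cons p rest ih =>
    simp only [List.map_cons, List.contains_cons, ih]
    have hkey : (pvSp a b == pvSp p.1 p.2) = (((a, b) == p) || ((b, a) == p)) := by
      by_cases hcase : pvSp p.1 p.2 = pvSp a b
      · rcases (pvSp_eq_iff p.1 p.2 a b).mp hcase with ⟨h1, h2⟩ | ⟨h1, h2⟩
        · have hp : p = (a, b) := Prod.ext_iff.mpr ⟨h1, h2⟩
          simp [hp, hcase.symm]
        · have hp : p = (b, a) := Prod.ext_iff.mpr ⟨h1, h2⟩
          simp [hp, hcase.symm]
      · have h1 : p ≠ (a, b) := by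
          rintro rfl; exact hcase ((pvSp_eq_iff _ _ _ _).mpr (Or.inl ⟨rfl, rfl⟩))
        have h2 : p ≠ (b, a) := by
          rintro rfl; exact hcase ((pvSp_eq_iff _ _ _ _).mpr (Or.inr ⟨rfl, rfl⟩))
        have hne : pvSp a b ≠ pvSp p.1 p.2 := fun h => hcase h.symm
        have hL : (pvSp a b == pvSp p.1 p.2) = false := beq_eq_false_iff_ne.mpr hne
        have hR1 : ((a, b) == p) = false := beq_eq_false_iff_ne.mpr (Ne.symm h1)
        have hR2 : ((b, a) == p) = false := beq_eq_false_iff_ne.mpr (Ne.symm h2)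
        rw [hL, hR1, hR2]
        rfl
    rw [hkey]
    cases ((a, b) == p) <;> cases ((b, a) == p) <;>
      cases rest.contains (a, b) <;> cases rest.contains (b, a) <;> rfl

-- A's loop over the synonyms list is membership of the ordered (key, value) pair list
theorem pvLoop_eq_pairs (syns : List (String × List String)) (a b : String) :
    pvSynLoop syns a b
      = ((a == b) || (pvPairsOf syns).contains (a, b) || (pvPairsOf syns).contains (b, a)) := by
  induction syns with
  | nil => simp [pvSynLoop, pvPairsOf]
  | cons kv rest ih =>
    obtain ⟨k, V⟩ := kv
    have hmem : ∀ x y : String,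
        ((V.map (fun v => (k, v))).contains (x, y)) = ((x == k) && V.contains y) := by
      intro x y
      by_cases hx : x = k
      · subst hx
        simp [List.contains_eq_mem, List.mem_map, Prod.ext_iff, eq_comm]
      · have h1 : (x == k) = false := by simp [hx]
        simp [List.contains_eq_mem, List.mem_map, Prod.ext_iff, h1, Ne.symm hx]
    rw [pvSynLoop]
    simp only [pvPairsOf, List.flatMap_cons, List.contains_append, hmem]
    rw [show (rest.flatMap fun kv => kv.2.map fun v => (kv.1, v)) = pvPairsOf rest from rfl]
    by_cases hc : ((a == k && V.contains b) || (b == k && V.contains a)) = true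
    · rw [if_pos hc]
      symm
      simp only [Bool.or_eq_true, Bool.and_eq_true, beq_iff_eq, List.contains_eq_mem,
        decide_eq_true_eq] at hc ⊢
      tauto
    · rw [if_neg hc, ih]
      have hc2 : ((a == k && V.contains b) || (b == k && V.contains a)) = false :=
        Bool.eq_false_iff.mpr hc
      have hc' := Bool.or_eq_false_iff.mp hc2
      rw [hc'.1, hc'.2]
      simp only [Bool.false_or]

-- the concrete pair set of Source B is exactly the sorted image of A's (key, value) pairs
theorem pvPairs_concrete :
    pvSimilarPairs = (pvPairsOf pvSynonyms).map (fun p => pvSp p.1 p.2) := by decide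

-- ===== VERDICT (by name: the statement is the Claim_ definition above) =====
theorem answers_similar_py_spec : Claim_equal_answers_similar_py := by
  intro answer1 answer2 _
  unfold Spec_answers_similar_py answers_similar_py answers_similar_py_alt
  simp only []
  set a1 := PySem.Str.strip (PySem.Str.lower answer1) with ha1
  set a2 := PySem.Str.strip (PySem.Str.lower answer2) with ha2
  rw [pvLoop_eq_pairs]
  by_cases h : a1 = a2
  · simp [h]
  · have hb : (a1 == a2) = false := by simp [h]
    rw [hb, if_neg (by simp)]
    rw [pvPairs_concrete, PySem.Set.contains]
    rw [show (if pvStrLtB a1 a2 then (a1, a2) else (a2, a1)) = pvSp a1 a2 from rfl]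
    rw [pvContains_map_sp]
    simp
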